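-- pv_equiv track=rewrite | github.com/ZoeSj/LeetCodeDay | 890_FindAndReplacePattern/findAndReplacePattern.py | numForPattern
-- ===== SOURCE A (Python) =====
-- def numForPattern(pattern, words):
--     p = []
--
--     def F(word):
--         m = {}
--         return [m.setdefault(c, len(m)) for c in word]
--
--     for w in words:
--         if F(w) == F(pattern):
--             p.append(w)
--
--     return p
-- ===== SOURCE B (Python) =====
-- def _iso(word, pattern):
--     fwd, bwd = {}, {}
--     for a, b in zip(word, pattern):
--         if a in fwd:
--             if fwd[a] != b:
--                 return False
--         else:
--             fwd[a] = b
--         if b in bwd: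
--             if bwd[b] != a:
--                 return False
--         else:
--             bwd[b] = a
--     return True
--
--
-- def numForPattern(pattern, words):
--     return [w for w in words if len(w) == len(pattern) and _iso(w, pattern)]
-- ===== Notes on version B (the rewrite author's own statement) =====
-- stated objective: faster
-- what changed: A builds a canonical normalization list for each word AND re-normalizes the pattern from scratch for every word, then compares the two lists; B guards on equal lengths and walks the zipped character pairs once per word, maintaining forward and backward character mappings and rejecting at the first inconsistent pair.
import Mathlib
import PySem

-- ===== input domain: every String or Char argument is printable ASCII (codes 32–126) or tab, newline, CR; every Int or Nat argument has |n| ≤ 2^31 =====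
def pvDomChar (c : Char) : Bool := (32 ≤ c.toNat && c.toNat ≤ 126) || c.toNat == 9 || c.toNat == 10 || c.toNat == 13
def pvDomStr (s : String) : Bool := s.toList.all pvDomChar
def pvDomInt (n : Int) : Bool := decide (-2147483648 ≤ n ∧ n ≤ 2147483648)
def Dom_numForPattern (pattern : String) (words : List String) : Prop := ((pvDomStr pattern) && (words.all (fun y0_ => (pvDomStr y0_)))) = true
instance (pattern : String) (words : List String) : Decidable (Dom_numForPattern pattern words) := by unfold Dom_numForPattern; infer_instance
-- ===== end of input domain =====

-- B replaces A's per-word canonical-normalization comparison (which re-normalizes the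
-- pattern for every word) by a length guard plus an incremental two-way mapping check.

-- ===== PORT A =====
-- F(word) = [m.setdefault(c, len(m)) for c in word]
def pvF (word : List Char) : List Int :=
  (word.foldl
    (fun (st : PySem.Dict Char Int × List Int) c =>
      (st.1.setdefault c ((st.1.size : Int)),
       st.2 ++ [(st.1.get? c).getD ((st.1.size : Int))]))
    (PySem.Dict.empty, [])).2

def numForPattern (pattern : String) (words : List String) : List String :=
  words.foldl (fun p w => if pvF w.toList = pvF pattern.toList then p ++ [w] else p) []

-- ===== PORT B =====
-- the loop of _iso: two mutual mappings fwd (word→pattern) and bwd (pattern→word)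
def pvIso : List Char → List Char → PySem.Dict Char Char → PySem.Dict Char Char → Bool
  | x :: xs, y :: ys, fwd, bwd =>
    match fwd.get? x with
    | some y' =>
      if y' ≠ y then false
      else
        match bwd.get? y with
        | some x' => if x' ≠ x then false else pvIso xs ys fwd bwd
        | none => pvIso xs ys fwd (bwd.insert y x)
    | none =>
      let fwd' := fwd.insert x y
      match bwd.get? y with
      | some x' => if x' ≠ x then false else pvIso xs ys fwd' bwd
      | none => pvIso xs ys fwd' (bwd.insert y x)
  | _, _, _, _ => true

def numForPattern_alt (pattern : String) (words : List String) : List String :=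
  words.filter (fun w =>
    decide (PySem.Str.len w = PySem.Str.len pattern) &&
    pvIso w.toList pattern.toList PySem.Dict.empty PySem.Dict.empty)

-- ===== PRECONDITION & SPEC =====
def Spec_numForPattern (pattern : String) (words : List String) (out : List String) : Prop := out = numForPattern_alt pattern words
instance (pattern : String) (words : List String) (out : List String) : Decidable (Spec_numForPattern pattern words out) := by unfold Spec_numForPattern; infer_instance

-- ===== CLAIM (what is proved, stated in full; the proofs are below) =====
def Claim_equal_numForPattern : Prop := ∀ (pattern : String) (words : List String), Dom_numForPattern pattern words → Spec_numForPattern pattern words (numForPattern pattern words)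

-- ===== LEMMAS AND PROOFS =====

-- recursive form of A's normalizer (same computation, recursion instead of a foldl)
def pvFrec : List Char → PySem.Dict Char Int → List Int
  | [], _ => []
  | c :: cs, m =>
    match m.get? c with
    | some v => v :: pvFrec cs m
    | none => ((m.size : Int)) :: pvFrec cs (m.insert c ((m.size : Int)))

lemma pvF_foldl_eq (w : List Char) :
    ∀ (m : PySem.Dict Char Int) (acc : List Int),
      (w.foldl
        (fun (st : PySem.Dict Char Int × List Int) c =>
          (st.1.setdefault c ((st.1.size : Int)),
           st.2 ++ [(st.1.get? c).getD ((st.1.size : Int))]))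
        (m, acc)).2 = acc ++ pvFrec w m := by
  induction w with
  | nil => intro m acc; simp [pvFrec]
  | cons c cs ih =>
    intro m acc
    cases hc : m.get? c with
    | some v =>
      have hcon : m.contains c = true := by
        rw [PySem.Dict.contains_eq_isSome_get?, hc]; rfl
      simp [List.foldl_cons, PySem.Dict.setdefault_of_contains m _ hcon, hc, ih, pvFrec]
    | none =>
      have hcon : m.contains c = false := by
        rw [PySem.Dict.contains_eq_isSome_get?, hc]; rfl
      simp [List.foldl_cons, PySem.Dict.setdefault_of_not_contains m _ hcon, hc, ih, pvFrec]

lemma pvF_eq (w : List Char) : pvF w = pvFrec w PySem.Dict.empty := by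
  simpa using pvF_foldl_eq w PySem.Dict.empty []

lemma pvFrec_length (w : List Char) : ∀ m, (pvFrec w m).length = w.length := by
  induction w with
  | nil => intro m; simp [pvFrec]
  | cons c cs ih =>
    intro m
    cases hc : m.get? c with
    | some v => simp [pvFrec, hc, ih]
    | none => simp [pvFrec, hc, ih]

-- the lockstep invariant tying A's two index dicts to B's two mapping dicts
def pvInv (m1 m2 : PySem.Dict Char Int) (f b : PySem.Dict Char Char) : Prop :=
  (∀ c d, f.get? c = some d ↔ ∃ k, m1.get? c = some k ∧ m2.get? d = some k) ∧
  (∀ c d, b.get? d = some c ↔ ∃ k, m1.get? c = some k ∧ m2.get? d = some k) ∧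
  (∀ c, (m1.get? c).isSome = true → (f.get? c).isSome = true) ∧
  (∀ d, (m2.get? d).isSome = true → (b.get? d).isSome = true) ∧
  m1.size = m2.size ∧
  (∀ c k, m1.get? c = some k → k < (m1.size : Int)) ∧
  (∀ d k, m2.get? d = some k → k < (m2.size : Int)) ∧
  (∀ c c' k, m1.get? c = some k → m1.get? c' = some k → c = c') ∧
  (∀ d d' k, m2.get? d = some k → m2.get? d' = some k → d = d')

lemma pvInv_empty : pvInv PySem.Dict.empty PySem.Dict.empty PySem.Dict.empty PySem.Dict.empty := by
  refine ⟨?_, ?_, ?_, ?_, rfl, ?_, ?_, ?_, ?_⟩ <;> simp [PySem.Dict.get?_empty]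

lemma pvInv_step (m1 m2 : PySem.Dict Char Int) (f b : PySem.Dict Char Char)
    (x y : Char) (h : pvInv m1 m2 f b)
    (hx : m1.get? x = none) (hy : m2.get? y = none) :
    pvInv (m1.insert x ((m1.size : Int))) (m2.insert y ((m2.size : Int)))
          (f.insert x y) (b.insert y x) := by
  obtain ⟨h1, h2, h3, h4, h5, h6, h7, h8, h9⟩ := h
  have hxcon : m1.contains x = false := by
    rw [PySem.Dict.contains_eq_isSome_get?, hx]; rfl
  have hycon : m2.contains y = false := by
    rw [PySem.Dict.contains_eq_isSome_get?, hy]; rfl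
  have hsz1 : (m1.insert x ((m1.size : Int))).size = m1.size + 1 := by
    simp [PySem.Dict.size_insert, hxcon]
  have hsz2 : (m2.insert y ((m2.size : Int))).size = m2.size + 1 := by
    simp [PySem.Dict.size_insert, hycon]
  refine ⟨?_, ?_, ?_, ?_, ?_, ?_, ?_, ?_, ?_⟩
  · intro c d
    rw [PySem.Dict.get?_insert]
    by_cases hc : c = x
    · subst hc
      rw [if_pos rfl]
      constructor
      · intro h
        obtain rfl : y = d := by injection h
        refine ⟨(m1.size : Int), ?_, ?_⟩
        · rw [PySem.Dict.get?_insert, if_pos rfl]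
        · rw [PySem.Dict.get?_insert, if_pos rfl, h5]
      · rintro ⟨k, hk1, hk2⟩
        rw [PySem.Dict.get?_insert, if_pos rfl] at hk1
        obtain rfl : k = (m1.size : Int) := Option.some.inj hk1.symm
        rw [PySem.Dict.get?_insert] at hk2
        by_cases hd : d = y
        · rw [hd]
        · rw [if_neg hd] at hk2
          exfalso; have := h7 d _ hk2; omega
    · rw [if_neg hc]
      constructor
      · intro hf
        obtain ⟨k, hk1, hk2⟩ := (h1 c d).mp hf
        have hd : d ≠ y := by rintro rfl; rw [hy] at hk2; cases hk2
        exact ⟨k, by rw [PySem.Dict.get?_insert, if_neg hc]; exact hk1,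
               by rw [PySem.Dict.get?_insert, if_neg hd]; exact hk2⟩
      · rintro ⟨k, hk1, hk2⟩
        rw [PySem.Dict.get?_insert, if_neg hc] at hk1
        by_cases hd : d = y
        · subst hd
          rw [PySem.Dict.get?_insert, if_pos rfl] at hk2
          obtain rfl : k = (m2.size : Int) := Option.some.inj hk2.symm
          have := h6 c _ hk1; omega
        · rw [PySem.Dict.get?_insert, if_neg hd] at hk2
          exact (h1 c d).mpr ⟨k, hk1, hk2⟩
  · intro c d
    rw [PySem.Dict.get?_insert]
    by_cases hd : d = y
    · subst hd
      rw [if_pos rfl]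
      constructor
      · intro h
        obtain rfl : x = c := by injection h
        refine ⟨(m1.size : Int), ?_, ?_⟩
        · rw [PySem.Dict.get?_insert, if_pos rfl]
        · rw [PySem.Dict.get?_insert, if_pos rfl, h5]
      · rintro ⟨k, hk1, hk2⟩
        rw [PySem.Dict.get?_insert, if_pos rfl] at hk2
        obtain rfl : k = (m2.size : Int) := Option.some.inj hk2.symm
        rw [PySem.Dict.get?_insert] at hk1
        by_cases hc : c = x
        · rw [hc]
        · rw [if_neg hc] at hk1
          exfalso; have := h6 c _ hk1; omega
    · rw [if_neg hd]
      constructor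
      · intro hb
        obtain ⟨k, hk1, hk2⟩ := (h2 c d).mp hb
        have hc : c ≠ x := by rintro rfl; rw [hx] at hk1; cases hk1
        exact ⟨k, by rw [PySem.Dict.get?_insert, if_neg hc]; exact hk1,
               by rw [PySem.Dict.get?_insert, if_neg hd]; exact hk2⟩
      · rintro ⟨k, hk1, hk2⟩
        rw [PySem.Dict.get?_insert, if_neg hd] at hk2
        by_cases hc : c = x
        · subst hc
          rw [PySem.Dict.get?_insert, if_pos rfl] at hk1
          obtain rfl : k = (m1.size : Int) := Option.some.inj hk1.symm
          have := h7 d _ hk2; rw [← h5] at this; omega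
        · rw [PySem.Dict.get?_insert, if_neg hc] at hk1
          exact (h2 c d).mpr ⟨k, hk1, hk2⟩
  · intro c
    rw [PySem.Dict.get?_insert, PySem.Dict.get?_insert]
    by_cases hc : c = x
    · simp [hc]
    · rw [if_neg hc, if_neg hc]; exact h3 c
  · intro d
    rw [PySem.Dict.get?_insert, PySem.Dict.get?_insert]
    by_cases hd : d = y
    · simp [hd]
    · rw [if_neg hd, if_neg hd]; exact h4 d
  · rw [hsz1, hsz2, h5]
  · intro c k hk
    rw [PySem.Dict.get?_insert] at hk
    rw [hsz1]
    by_cases hc : c = x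
    · rw [if_pos hc] at hk
      obtain rfl : k = (m1.size : Int) := Option.some.inj hk.symm
      push_cast; omega
    · rw [if_neg hc] at hk
      have := h6 c _ hk; push_cast; omega
  · intro d k hk
    rw [PySem.Dict.get?_insert] at hk
    rw [hsz2]
    by_cases hd : d = y
    · rw [if_pos hd] at hk
      obtain rfl : k = (m2.size : Int) := Option.some.inj hk.symm
      push_cast; omega
    · rw [if_neg hd] at hk
      have := h7 d _ hk; push_cast; omega
  · intro c c' k hk hk'
    rw [PySem.Dict.get?_insert] at hk hk'
    by_cases hc : c = x <;> by_cases hc' : c' = x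
    · rw [hc, hc']
    · rw [if_pos hc] at hk; rw [if_neg hc'] at hk'
      obtain rfl : k = (m1.size : Int) := Option.some.inj hk.symm
      have := h6 c' _ hk'; omega
    · rw [if_neg hc] at hk; rw [if_pos hc'] at hk'
      obtain rfl : k = (m1.size : Int) := Option.some.inj hk'.symm
      have := h6 c _ hk; omega
    · rw [if_neg hc] at hk; rw [if_neg hc'] at hk'
      exact h8 c c' k hk hk'
  · intro d d' k hk hk'
    rw [PySem.Dict.get?_insert] at hk hk'
    by_cases hd : d = y <;> by_cases hd' : d' = y
    · rw [hd, hd']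
    · rw [if_pos hd] at hk; rw [if_neg hd'] at hk'
      obtain rfl : k = (m2.size : Int) := Option.some.inj hk.symm
      have := h7 d' _ hk'; omega
    · rw [if_neg hd] at hk; rw [if_pos hd'] at hk'
      obtain rfl : k = (m2.size : Int) := Option.some.inj hk'.symm
      have := h7 d _ hk; omega
    · rw [if_neg hd] at hk; rw [if_neg hd'] at hk'
      exact h9 d d' k hk hk'

lemma pvMain (w : List Char) :
    ∀ (p : List Char) (m1 m2 : PySem.Dict Char Int) (f b : PySem.Dict Char Char),
      pvInv m1 m2 f b →
      (pvFrec w m1 = pvFrec p m2 ↔ (w.length = p.length ∧ pvIso w p f b = true)) := by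
  induction w with
  | nil =>
    intro p m1 m2 f b _
    cases p with
    | nil => simp [pvFrec, pvIso]
    | cons y ys =>
      constructor
      · intro h
        have hlen := congrArg List.length h
        rw [pvFrec_length, pvFrec_length] at hlen
        simp at hlen
      · rintro ⟨h, -⟩; simp at h
  | cons x xs ih =>
    intro p m1 m2 f b hinv
    cases p with
    | nil =>
      constructor
      · intro h
        have hlen := congrArg List.length h
        rw [pvFrec_length, pvFrec_length] at hlen
        simp at hlen
      · rintro ⟨h, -⟩; simp at h
    | cons y ys =>
      obtain ⟨h1, h2, h3, h4, h5, h6, h7, h8, h9⟩ := hinv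
      cases hx : m1.get? x with
      | some k1 =>
        cases hy : m2.get? y with
        | some k2 =>
          -- both chars seen before
          obtain ⟨d', hfd⟩ : ∃ d', f.get? x = some d' := by
            have := h3 x (by rw [hx]; rfl)
            cases hf : f.get? x with
            | none => rw [hf] at this; cases this
            | some d' => exact ⟨d', rfl⟩
          obtain ⟨k, hk1, hk2⟩ := (h1 x d').mp hfd
          rw [hx] at hk1
          have e1 : k1 = k := Option.some.inj hk1
          by_cases hdy : d' = y
          · subst hdy
            have hby : b.get? d' = some x := (h2 x d').mpr ⟨k, e1 ▸ hx, hk2⟩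
            have e2 : k2 = k := by
              rw [hy] at hk2; exact Option.some.inj hk2
            simp only [pvFrec, hx, hy, pvIso, hfd, hby]
            rw [if_neg (by simp), if_neg (by simp), e1, e2]
            simp only [List.cons.injEq, true_and, List.length_cons]
            rw [ih ys m1 m2 f b ⟨h1, h2, h3, h4, h5, h6, h7, h8, h9⟩]
            constructor
            · rintro ⟨hl, hi⟩; exact ⟨by omega, hi⟩
            · rintro ⟨hl, hi⟩; exact ⟨by omega, hi⟩
          · have hkne : k1 ≠ k2 := by
              intro hkk
              exact hdy (h9 d' y k1 (e1 ▸ hk2) (hkk ▸ hy))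
            simp only [pvFrec, hx, hy, pvIso, hfd]
            rw [if_pos (by simpa using hdy)]
            simp [hkne]
        | none =>
          -- word char seen, pattern char fresh: A's heads differ, B rejects
          obtain ⟨d', hfd⟩ : ∃ d', f.get? x = some d' := by
            have := h3 x (by rw [hx]; rfl)
            cases hf : f.get? x with
            | none => rw [hf] at this; cases this
            | some d' => exact ⟨d', rfl⟩
          obtain ⟨k, hk1, hk2⟩ := (h1 x d').mp hfd
          have hdy : d' ≠ y := by rintro rfl; rw [hy] at hk2; cases hk2
          have hlt : k1 < (m2.size : Int) := by
            have := h6 x k1 hx; omega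
          simp only [pvFrec, hx, hy, pvIso, hfd]
          rw [if_pos (by simpa using hdy)]
          constructor
          · intro hcontra
            exfalso
            have : k1 = (m2.size : Int) := by
              have := congrArg (fun l => l.headI) hcontra; simpa using this
            omega
          · rintro ⟨-, hfalse⟩; cases hfalse
      | none =>
        cases hy : m2.get? y with
        | some k2 =>
          -- word char fresh, pattern char seen
          have hfx : f.get? x = none := by
            cases hf : f.get? x with
            | none => rfl
            | some d' =>
              obtain ⟨k, hk1, -⟩ := (h1 x d').mp hf
              rw [hx] at hk1; cases hk1
          obtain ⟨x', hbx⟩ : ∃ x', b.get? y = some x' := by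
            have := h4 y (by rw [hy]; rfl)
            cases hb : b.get? y with
            | none => rw [hb] at this; cases this
            | some x' => exact ⟨x', rfl⟩
          obtain ⟨k, hk1, hk2⟩ := (h2 x' y).mp hbx
          have hxx : x' ≠ x := by rintro rfl; rw [hx] at hk1; cases hk1
          have hlt : k2 < (m1.size : Int) := by
            have := h7 y k2 hy; omega
          simp only [pvFrec, hx, hy, pvIso, hfx, hbx]
          rw [if_pos (by simpa using hxx)]
          constructor
          · intro hcontra
            exfalso
            have : (m1.size : Int) = k2 := by
              have := congrArg (fun l => l.headI) hcontra; simpa using this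
            omega
          · rintro ⟨-, hfalse⟩; cases hfalse
        | none =>
          -- both fresh: equal heads, insert into all four dicts
          have hfx : f.get? x = none := by
            cases hf : f.get? x with
            | none => rfl
            | some d' =>
              obtain ⟨k, hk1, -⟩ := (h1 x d').mp hf
              rw [hx] at hk1; cases hk1
          have hby : b.get? y = none := by
            cases hb : b.get? y with
            | none => rfl
            | some x' =>
              obtain ⟨k, -, hk2⟩ := (h2 x' y).mp hb
              rw [hy] at hk2; cases hk2
          have hinv' := pvInv_step m1 m2 f b x y
            ⟨h1, h2, h3, h4, h5, h6, h7, h8, h9⟩ hx hy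
          simp only [pvFrec, hx, hy, pvIso, hfx, hby]
          simp only [List.cons.injEq, List.length_cons]
          rw [ih ys _ _ _ _ hinv']
          constructor
          · rintro ⟨-, hl, hi⟩; exact ⟨by omega, hi⟩
          · rintro ⟨hl, hi⟩
            exact ⟨by exact_mod_cast h5, by omega, hi⟩

-- ===== VERDICT (by name: the statement is the Claim_ definition above) =====
theorem numForPattern_spec : Claim_equal_numForPattern := by
  unfold Claim_equal_numForPattern
  intro pattern words _
  unfold Spec_numForPattern numForPattern numForPattern_alt
  rw [PySem.List.foldl_append_ite_eq_filter]
  simp only [List.nil_append]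
  apply List.filter_congr
  intro w _
  simp only [pvF_eq]
  have hmain := pvMain w.toList pattern.toList PySem.Dict.empty PySem.Dict.empty
    PySem.Dict.empty PySem.Dict.empty pvInv_empty
  by_cases h : pvFrec w.toList PySem.Dict.empty = pvFrec pattern.toList PySem.Dict.empty
  · obtain ⟨hl, hi⟩ := hmain.mp h
    have hl' : PySem.Str.len w = PySem.Str.len pattern := by
      simp only [PySem.Str.len_eq]; exact_mod_cast hl
    simp only [decide_eq_true h, hi, Bool.and_true, decide_eq_true hl']
  · rw [decide_eq_false h]
    by_cases hl : w.toList.length = pattern.toList.length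
    · have hi : pvIso w.toList pattern.toList PySem.Dict.empty PySem.Dict.empty = false := by
        cases hiso : pvIso w.toList pattern.toList PySem.Dict.empty PySem.Dict.empty with
        | false => rfl
        | true => exact absurd (hmain.mpr ⟨hl, hiso⟩) h
      simp [hi]
    · have hl' : ¬(PySem.Str.len w = PySem.Str.len pattern) := by
        simp only [PySem.Str.len_eq]; exact_mod_cast hl
      simp only [decide_eq_false hl', Bool.false_and]
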